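-- pv_equiv track=rewrite | github.com/olshissy/University-Work | Advanced algorithms and data structures/boyer_moore.py | matched_prefix
-- ===== SOURCE A (Python) =====
-- def z_algorithm(txt: str) -> list[int]:
--     """
--     Gusfield's Z algorithm implementation used to find Z values at each index of a string
--     Time complexity: O(n) where n is the length of the input string
--
--     :param txt: String used to find the Z values
--     :return: Array containing the Z values of the input string
--     """
--
--     #Variable declaration
--     n = len(txt)
--     z_array = [0] * n
--     left = 0
--     right = 0
--
--     def comparison(start, end):
--         """
--         Function used to compare a string to a substring until there is no longer a match
--
--         :param start: index where matching starts
--         :param end: index where matching ends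
--         :return: None
--         """
--         while end < n and txt[end-start] == txt[end]:
--             end += 1
--         z_array[k] = end - start
--         end -= 1
--
--     #Find Z values from Z1 as Z0 is not useful information
--     for k in range(1,n):
--
--         #Case 1
--         if k > right:
--             left, right = k, k
--             comparison(left, right)
--
--         #Case 2
--         else:
--             index = k - left
--
--             #Case 2a
--             if z_array[index] < right - k:
--                 z_array[k] = z_array[index]
--
--             #Case 2b
--             else:
--                 left = k
--                 comparison(left, right)
--
--     return z_array
--
-- def matched_prefix(pattern: str) -> list[int]:
--     """
--     Function that implements the matched prefix rule
--     Time complexity: O(m) where m is the length of the pattern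
--
--     :param pattern: the pattern to be processes
--     :return: an array of matched prefix values
--     """
--     m = len(pattern)
--     mp_table = [0] * (m + 1)
--     mp_table[0] = m
--     z_values = z_algorithm(pattern)
--
--     j = 0 #Keeps track of the max length of substrings that match the prefix
--
--     for i in range(m - 1, 0, -1):
--         j = max(j, z_values[i])
--         mp_table[i] = j
--
--     return mp_table
-- ===== SOURCE B (Python) =====
-- def matched_prefix(pattern: str) -> list[int]:
--     """Matched-prefix table, computed directly: for each shift k take the length of the
--     longest common prefix of pattern and pattern[k:], keep a running max from the right,
--     and build the table back-to-front without any z-array."""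
--     m = len(pattern)
--     if m == 0:
--         return [0]
--     rev = [0]                      # mp_table[m]
--     j = 0
--     for k in range(m - 1, 0, -1):
--         l = 0
--         while k + l < m and pattern[l] == pattern[k + l]:
--             l += 1
--         j = max(j, l)
--         rev.append(j)
--     rev.append(m)                  # mp_table[0]
--     return rev[::-1]
-- ===== Notes on version B (the rewrite author's own statement) =====
-- stated objective: simpler
-- what changed: B drops A's Z-algorithm machinery entirely: it computes each shift's prefix-match length with a direct counting scan, fuses that with the backward running-max pass, and builds the table back-to-front with appends plus one reversal - no z-array, no preallocated table writes, no window bookkeeping (in A the window's upper bound is only ever reset to the current loop index, so its Z-algorithm cases 2a/2b are dead code and A is brute force as well).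
import Mathlib
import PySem

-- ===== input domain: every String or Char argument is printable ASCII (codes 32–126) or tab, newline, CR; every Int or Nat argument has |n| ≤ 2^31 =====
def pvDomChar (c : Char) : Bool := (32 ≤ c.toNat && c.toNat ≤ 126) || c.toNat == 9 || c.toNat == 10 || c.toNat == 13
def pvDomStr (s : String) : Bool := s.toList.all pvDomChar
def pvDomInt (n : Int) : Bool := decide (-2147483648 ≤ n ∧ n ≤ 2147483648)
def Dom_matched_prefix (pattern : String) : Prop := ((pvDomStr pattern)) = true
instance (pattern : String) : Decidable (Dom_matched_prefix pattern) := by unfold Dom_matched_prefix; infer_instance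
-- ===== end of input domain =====

-- B fuses the per-shift prefix-match scan with the backward running-max pass, building the
-- table back-to-front without A's z-array, mp-table writes or left/right bookkeeping (objective: simpler).

-- ===== PORT A =====
-- the inner 'comparison' while loop; its final 'end -= 1' is local in Python and has no effect,
-- so the port returns the value of 'end' after the loop (the stored value is end - start)
def pvCmpLoop (txt : List Char) (n start e : Int) : Int :=
  if h : e < n ∧ PySem.List.pyGetD txt (e - start) ' ' = PySem.List.pyGetD txt e ' ' then
    pvCmpLoop txt n start (e + 1)
  else e
termination_by (n - e).toNat
decreasing_by omega

-- one iteration of the 'for k in range(1, n)' loop; state = (z_array, left, right)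
def pvZStep (txt : List Char) (n : Int) (s : List Int × Int × Int) (k : Int) :
    List Int × Int × Int :=
  if k > s.2.2 then
    (PySem.List.pySetD s.1 k (pvCmpLoop txt n k k - k), k, k)
  else
    if PySem.List.pyGetD s.1 (k - s.2.1) 0 < s.2.2 - k then
      (PySem.List.pySetD s.1 k (PySem.List.pyGetD s.1 (k - s.2.1) 0), s.2.1, s.2.2)
    else
      (PySem.List.pySetD s.1 k (pvCmpLoop txt n k s.2.2 - k), k, s.2.2)

def pvZAlgorithm (txt : List Char) : List Int :=
  ((PySem.List.pyRange 1 (txt.length : Int) 1).foldl (pvZStep txt (txt.length : Int))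
    (List.replicate txt.length 0, 0, 0)).1

def matched_prefix (pattern : String) : List Int :=
  let txt := pattern.toList
  let m : Int := (txt.length : Int)
  let mp0 := PySem.List.pySetD (List.replicate (txt.length + 1) 0) 0 m
  let z := pvZAlgorithm txt
  ((PySem.List.pyRange (m - 1) 0 (-1)).foldl
    (fun (s : List Int × Int) i =>
      let j := max s.2 (PySem.List.pyGetD z i 0)
      (PySem.List.pySetD s.1 i j, j)) (mp0, 0)).1

-- ===== PORT B =====
-- the 'while k + l < m and pattern[l] == pattern[k+l]' counting loop of B
def pvLcpLoop (txt : List Char) (m k l : Int) : Int :=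
  if h : k + l < m ∧ PySem.List.pyGetD txt l ' ' = PySem.List.pyGetD txt (k + l) ' ' then
    pvLcpLoop txt m k (l + 1)
  else l
termination_by (m - (k + l)).toNat
decreasing_by omega

def matched_prefix_alt (pattern : String) : List Int :=
  let txt := pattern.toList
  let m : Int := (txt.length : Int)
  if m = 0 then [0]
  else
    (((PySem.List.pyRange (m - 1) 0 (-1)).foldl
      (fun (s : List Int × Int) k =>
        let j := max s.2 (pvLcpLoop txt m k 0)
        (s.1 ++ [j], j)) ([0], 0)).1 ++ [m]).reverse

-- ===== PRECONDITION & SPEC =====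
def Spec_matched_prefix (pattern : String) (out : List Int) : Prop := out = matched_prefix_alt pattern
instance (pattern : String) (out : List Int) : Decidable (Spec_matched_prefix pattern out) := by unfold Spec_matched_prefix; infer_instance

-- ===== CLAIM (what is proved, stated in full; the proofs are below) =====
def Claim_equal_matched_prefix : Prop := ∀ (pattern : String), Dom_matched_prefix pattern → Spec_matched_prefix pattern (matched_prefix pattern)

-- ===== LEMMAS AND PROOFS =====

-- A's 'comparison' loop counts the same matches as B's lcp loop, shifted by the start index
lemma cmp_eq_lcp (txt : List Char) (n k : Int) : ∀ (l : Int),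
    pvCmpLoop txt n k (k + l) = k + pvLcpLoop txt n k l := by
  intro l
  induction l using pvLcpLoop.induct txt n k with
  | case1 l h ih =>
    rw [pvCmpLoop, pvLcpLoop, dif_pos (by simpa using h), dif_pos h,
      show k + l + 1 = k + (l + 1) by ring]
    exact ih
  | case2 l h =>
    rw [pvCmpLoop, pvLcpLoop, dif_neg (by simpa using h), dif_neg h]

-- in A's z loop 'right' is only ever set to the current k, so 'k > right' always holds:
-- case 2 is dead code and the loop reduces to a plain write of the brute-force value
lemma zfold_case1 (txt : List Char) (n : Int) : ∀ (fuel : Nat) (k : Int)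
    (_ : (n - k).toNat = fuel) (z : List Int) (l r : Int) (_ : r < k),
    ((PySem.List.pyRange k n 1).foldl (pvZStep txt n) (z, l, r)).1
      = (PySem.List.pyRange k n 1).foldl
          (fun z' k' => PySem.List.pySetD z' k' (pvCmpLoop txt n k' k' - k')) z := by
  intro fuel
  induction fuel with
  | zero =>
    intro k hf z l r _
    rw [PySem.List.pyRange_one_eq_nil (by omega)]
    rfl
  | succ fuel ih =>
    intro k hf z l r hr
    by_cases hkn : k < n
    · rw [PySem.List.pyRange_one_cons hkn]
      simp only [List.foldl_cons]
      rw [show pvZStep txt n (z, l, r) k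
            = (PySem.List.pySetD z k (pvCmpLoop txt n k k - k), k, k) by
          rw [pvZStep, if_pos hr]]
      exact ih (k + 1) (by omega) _ k k (by omega)
    · rw [PySem.List.pyRange_one_eq_nil (by omega)]
      rfl

-- setting index k then taking k+1 elements appends the new value to the first k elements
lemma take_set_succ (z : List Int) (k : Nat) (v : Int) (h : k < z.length) :
    (z.set k v).take (k + 1) = z.take k ++ [v] := by
  rw [List.take_add_one, List.getElem?_set_self (by simpa using h)]
  rw [List.take_set, List.set_eq_of_length_le (by simp)]
  rfl

-- sequential writes at indices k, k+1, …, n-1 replace the tail of the array by the mapped range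
lemma write_fold_eq (g : Int → Int) (n : Nat) : ∀ (fuel k : Nat)
    (_ : n - k = fuel) (_ : k ≤ n) (z : List Int) (_ : z.length = n),
    (PySem.List.pyRange (k : Int) (n : Int) 1).foldl
        (fun z' k' => PySem.List.pySetD z' k' (g k')) z
      = z.take k ++ (PySem.List.pyRange (k : Int) (n : Int) 1).map g := by
  intro fuel
  induction fuel with
  | zero =>
    intro k hf hk z hz
    have hkn : k = n := by omega
    subst hkn
    rw [PySem.List.pyRange_one_eq_nil (by omega)]
    simp [← hz]
  | succ fuel ih =>
    intro k hf hk z hz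
    have hkn : (k : Int) < (n : Int) := by exact_mod_cast (by omega : k < n)
    rw [PySem.List.pyRange_one_cons hkn]
    simp only [List.foldl_cons, List.map_cons]
    rw [PySem.List.pySetD_natCast]
    rw [show (k : Int) + 1 = ((k + 1 : Nat) : Int) by push_cast; ring]
    rw [ih (k + 1) (by omega) (by omega) (z.set k (g k)) (by simpa using hz)]
    rw [take_set_succ _ _ _ (by omega)]
    simp

-- B's fold appends exactly the values A's fold writes into the table from the right end
lemma loop_rel (f : Int → Int) : ∀ (t : Nat) (a : Int) (rev : List Int) (j : Int),
    ((PySem.List.pyRange (t : Int) 0 (-1)).foldl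
        (fun (s : List Int × Int) i =>
          let v := max s.2 (f i)
          (PySem.List.pySetD s.1 i v, v)) (a :: (List.replicate t 0 ++ rev.reverse), j)).1
      = a :: (((PySem.List.pyRange (t : Int) 0 (-1)).foldl
          (fun (s : List Int × Int) i =>
            let v := max s.2 (f i)
            (s.1 ++ [v], v)) (rev, j)).1).reverse := by
  intro t
  induction t with
  | zero =>
    intro a rev j
    rw [PySem.List.pyRange_neg_one_eq_nil (by omega)]
    simp
  | succ t ih =>
    intro a rev j
    rw [PySem.List.pyRange_neg_one_cons (by exact_mod_cast (by omega : (0:Int) < (t+1 : Nat)))]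
    simp only [List.foldl_cons]
    rw [show ((t + 1 : Nat) : Int) - 1 = (t : Int) by push_cast; ring]
    rw [PySem.List.pySetD_natCast]
    rw [show (a :: (List.replicate (t + 1) 0 ++ rev.reverse)).set (t + 1)
          (max j (f ((t + 1 : Nat) : Int)))
        = a :: (List.replicate t 0 ++ (rev ++ [max j (f ((t + 1 : Nat) : Int))]).reverse) by
      rw [List.replicate_succ' (n := t)]
      simp]
    exact ih a (rev ++ [max j (f ((t + 1 : Nat) : Int))]) (max j (f ((t + 1 : Nat) : Int)))

-- ===== VERDICT (by name: the statement is the Claim_ definition above) =====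
theorem matched_prefix_spec : Claim_equal_matched_prefix := by
  intro pattern _
  unfold Spec_matched_prefix matched_prefix matched_prefix_alt
  set txt := pattern.toList with htxt
  simp only
  by_cases hm : (txt.length : Int) = 0
  · have h0 : txt.length = 0 := by exact_mod_cast hm
    rw [if_pos hm]
    rw [PySem.List.pyRange_neg_one_eq_nil (by omega)]
    simp [h0, PySem.List.pySetD_of_nonneg]
  · set M := txt.length with hM
    have hM1 : 1 ≤ M := by omega
    set m : Int := (M : Int) with hmm
    -- brute-force value per shift, as B computes it
    set f : Int → Int := fun i => pvLcpLoop txt m i 0 with hf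
    -- A's z loop is all case 1 (right < k always), hence a plain write of the comparison value
    have hz : pvZAlgorithm txt
        = 0 :: (PySem.List.pyRange 1 m 1).map (fun k => pvCmpLoop txt m k k - k) := by
      unfold pvZAlgorithm
      simp only [hmm]
      rw [zfold_case1 txt m (m - 1).toNat 1 rfl _ 0 0 (by omega)]
      have hw := write_fold_eq (fun k' => pvCmpLoop txt m k' k' - k') M (M - 1) 1 rfl
        (by omega) (List.replicate M 0) (by simp)
      norm_num at hw
      rw [← hM, hw]
      simp [Nat.min_eq_left hM1, hmm]
    -- every read the mp loop performs returns the brute-force value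
    have hread : ∀ i : Int, 0 < i → i < m →
        PySem.List.pyGetD (pvZAlgorithm txt) i 0 = f i := by
      intro i hi0 him
      obtain ⟨j, rfl⟩ : ∃ j : Nat, i = ((j + 1 : Nat) : Int) :=
        ⟨i.toNat - 1, by omega⟩
      rw [hz, PySem.List.pyGetD_natCast, List.getD_cons_succ]
      rw [show (List.map (fun k => pvCmpLoop txt m k k - k)
            (PySem.List.pyRange 1 m 1)).getD j 0
          = PySem.List.pyGetD (List.map (fun k => pvCmpLoop txt m k k - k)
            (PySem.List.pyRange 1 m 1)) ((j : Nat) : Int) 0 by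
        rw [PySem.List.pyGetD_natCast]]
      rw [PySem.List.pyGetD_map_pyRange_one _ 1 m j 0 (by omega)]
      have hcl := cmp_eq_lcp txt m (1 + (j : Int)) 0
      simp only [add_zero] at hcl
      rw [hcl, hf]
      push_cast
      ring_nf
    -- replace the table reads by f, then relate the two folds
    rw [if_neg hm]
    rw [PySem.List.foldl_congr_mem (PySem.List.pyRange (m - 1) 0 (-1)) _
      (fun (s : List Int × Int) i =>
        let v := max s.2 (f i)
        (PySem.List.pySetD s.1 i v, v)) _
      (by
        intro acc x hx
        rw [PySem.List.mem_pyRange_neg_one] at hx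
        simp only
        rw [hread x (by omega) (by omega)])]
    have hmp0 : PySem.List.pySetD (List.replicate (M + 1) (0 : Int)) 0 m
        = m :: (List.replicate (M - 1) 0 ++ ([0] : List Int).reverse) := by
      rw [PySem.List.pySetD_of_nonneg _ _ (by omega)]
      simp only [Int.toNat_zero, List.replicate_succ, List.set_cons_zero]
      rw [show M = (M - 1) + 1 by omega, List.replicate_succ' (n := M - 1)]
      simp
    rw [hmp0, show m - 1 = ((M - 1 : Nat) : Int) by omega]
    rw [loop_rel f (M - 1) m [0] 0]
    simp [hf]
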